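-- pv_equiv track=rewrite | github.com/wojmichaluk/WDI-2022-2023 | rozwiązania zestawów/zestaw 6/6.16.py | waga
-- ===== SOURCE A (Python) =====
-- def waga(s1,s2):
--     samogloski=set(['a','e','i','o','u','y'])
--     is1=is2=waga1=waga2=0
--     for char in s1:
--         if char in samogloski:
--             is1+=1
--         waga1+=ord(char)
--     for char in s2:
--         if char in samogloski:
--             is2+=1
--         waga2+=ord(char)
--     return waga1==waga2 and is1==is2
-- ===== SOURCE B (Python) =====
-- def waga(s1, s2):
--     def stats(s):
--         freq = {}
--         for ch in s:
--             freq[ch] = freq.get(ch, 0) + 1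
--         w = sum(ord(c) * n for c, n in freq.items())
--         v = sum(n for c, n in freq.items() if c in "aeiouy")
--         return (w, v)
--     return stats(s1) == stats(s2)
-- ===== Notes on version B (the rewrite author's own statement) =====
-- stated objective: alternative
-- what changed: B builds a character frequency table (dict) per string and derives the ord-sum and vowel count in one pass over the distinct characters, instead of A's per-character accumulator scans; it compares the (weight, vowels) pairs at once.
import Mathlib
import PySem

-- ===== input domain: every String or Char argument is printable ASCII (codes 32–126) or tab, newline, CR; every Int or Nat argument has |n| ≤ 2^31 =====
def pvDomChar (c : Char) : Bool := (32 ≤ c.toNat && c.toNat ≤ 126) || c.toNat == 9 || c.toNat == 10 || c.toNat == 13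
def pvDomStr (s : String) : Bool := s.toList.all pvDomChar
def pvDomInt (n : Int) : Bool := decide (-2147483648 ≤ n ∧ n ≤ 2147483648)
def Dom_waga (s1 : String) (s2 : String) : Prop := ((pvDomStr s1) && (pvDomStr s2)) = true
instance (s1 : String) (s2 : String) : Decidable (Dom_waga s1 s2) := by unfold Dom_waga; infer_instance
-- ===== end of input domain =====

-- B replaces A's two per-character accumulator scans by a frequency table per string,
-- deriving weight and vowel count from the distinct characters; same results, alternative structure.

-- ===== PORT A =====
def waga (s1 : String) (s2 : String) : Bool :=
  let samogloski : PySem.Set Char := PySem.Set.ofList ['a', 'e', 'i', 'o', 'u', 'y']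
  let st1 := s1.toList.foldl
    (fun (st : Int × Int) ch =>
      ((if samogloski.contains ch then st.1 + 1 else st.1), st.2 + (ch.toNat : Int)))
    ((0 : Int), (0 : Int))
  let st2 := s2.toList.foldl
    (fun (st : Int × Int) ch =>
      ((if samogloski.contains ch then st.1 + 1 else st.1), st.2 + (ch.toNat : Int)))
    ((0 : Int), (0 : Int))
  decide (st1.2 = st2.2) && decide (st1.1 = st2.1)

-- ===== PORT B =====
def wagaStats (s : String) : Int × Int :=
  let freq := s.toList.foldl
    (fun (d : PySem.Dict Char Int) ch => d.insert ch (d.getD ch 0 + 1)) PySem.Dict.empty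
  let w := (freq.items.map (fun p => (p.1.toNat : Int) * p.2)).sum
  let v := ((freq.items.filter (fun p => ("aeiouy".toList).contains p.1)).map (fun p => p.2)).sum
  (w, v)

def waga_alt (s1 : String) (s2 : String) : Bool :=
  decide (wagaStats s1 = wagaStats s2)

-- ===== PRECONDITION & SPEC =====
def Spec_waga (s1 : String) (s2 : String) (out : Bool) : Prop := out = waga_alt s1 s2
instance (s1 : String) (s2 : String) (out : Bool) : Decidable (Spec_waga s1 s2 out) := by unfold Spec_waga; infer_instance

-- ===== CLAIM (what is proved, stated in full; the proofs are below) =====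
def Claim_equal_waga : Prop := ∀ (s1 : String) (s2 : String), Dom_waga s1 s2 → Spec_waga s1 s2 (waga s1 s2)

-- ===== LEMMAS AND PROOFS =====

def wagaVowelP (c : Char) : Bool := (['a', 'e', 'i', 'o', 'u', 'y'] : List Char).contains c

def wagaW (xs : List Char) : Int := (xs.map (fun c => (c.toNat : Int))).sum

def wagaV (xs : List Char) : Int := (xs.map (fun c => if wagaVowelP c then (1 : Int) else 0)).sum

theorem wagaSetEval : PySem.Set.ofList ['a', 'e', 'i', 'o', 'u', 'y'] = (['a', 'e', 'i', 'o', 'u', 'y'] : List Char) := by decide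

theorem wagaFoldA (xs : List Char) (i w : Int) :
    xs.foldl
      (fun (st : Int × Int) ch =>
        ((if (PySem.Set.ofList ['a', 'e', 'i', 'o', 'u', 'y'] : PySem.Set Char).contains ch then st.1 + 1 else st.1),
          st.2 + (ch.toNat : Int))) (i, w)
    = (i + wagaV xs, w + wagaW xs) := by
  induction xs generalizing i w with
  | nil => simp [wagaV, wagaW]
  | cons c cs ih =>
    simp only [List.foldl_cons]
    rw [ih]
    have hcond : ((PySem.Set.ofList ['a', 'e', 'i', 'o', 'u', 'y'] : PySem.Set Char).contains c) = wagaVowelP c := by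
      rw [wagaSetEval]; rfl
    rw [hcond]
    simp only [wagaV, wagaW, List.map_cons, List.sum_cons, Prod.mk.injEq]
    by_cases h : wagaVowelP c
    · rw [if_pos h, if_pos h]; constructor <;> ring
    · rw [if_neg h, if_neg h]; constructor <;> ring

-- sum of g over xs splits into the k-occurrences and the rest
theorem wagaSumSplit (xs : List Char) (g : Char → Int) (k : Char) :
    (xs.map g).sum = (xs.count k : Int) * g k + ((xs.filter (fun x => !(x == k))).map g).sum := by
  induction xs with
  | nil => simp
  | cons x xs ih =>
    by_cases h : x = k
    · subst h
      simp [ih]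
      ring
    · simp [h, ih]
      ring

-- sum over a nodup list of the distinct elements of xs, weighted by multiplicity, is the sum over xs
theorem wagaSumCount (l : List Char) (xs : List Char) (hnd : l.Nodup)
    (hm : ∀ k, k ∈ l ↔ k ∈ xs) (g : Char → Int) :
    (l.map (fun k => g k * (xs.count k : Int))).sum = (xs.map g).sum := by
  induction l generalizing xs with
  | nil =>
    have hx : xs = [] := by
      cases xs with
      | nil => rfl
      | cons y ys => exact absurd ((hm y).mpr (by simp)) (by simp)
    simp [hx]
  | cons k l ih =>
    have hnd' : l.Nodup := hnd.of_cons
    have hkl : k ∉ l := by simp at hnd; exact hnd.1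
    have hmem : ∀ j, j ∈ l ↔ j ∈ xs.filter (fun x => !(x == k)) := by
      intro j
      constructor
      · intro hj
        have hjk : j ≠ k := fun h => hkl (h ▸ hj)
        simp [List.mem_filter, hjk]
        exact (hm j).mp (by simp [hj])
      · intro hj
        simp [List.mem_filter] at hj
        have := (hm j).mpr hj.1
        simp at this
        rcases this with h | h
        · exact absurd h hj.2
        · exact h
    have hcnt : ∀ j ∈ l, xs.count j = (xs.filter (fun x => !(x == k))).count j := by
      intro j hj
      have hjk : j ≠ k := fun h => hkl (h ▸ hj)
      rw [List.count_filter]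
      simp [hjk]
    calc ((k :: l).map (fun j => g j * (xs.count j : Int))).sum
        = g k * (xs.count k : Int) + (l.map (fun j => g j * (xs.count j : Int))).sum := by simp
      _ = g k * (xs.count k : Int)
            + (l.map (fun j => g j * ((xs.filter (fun x => !(x == k))).count j : Int))).sum := by
            congr 1
            apply congrArg
            exact List.map_congr_left (fun j hj => by rw [hcnt j hj])
      _ = g k * (xs.count k : Int) + ((xs.filter (fun x => !(x == k))).map g).sum := by
            rw [ih _ hnd' hmem]
      _ = (xs.map g).sum := by rw [wagaSumSplit xs g k]; ring

theorem wagaFilterMapSum (l : List Char) (q : Char → Bool) (f : Char → Int) :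
    ((l.filter q).map f).sum = (l.map (fun k => if q k then f k else 0)).sum := by
  induction l with
  | nil => simp
  | cons x xs ih =>
    by_cases h : q x <;> simp [h, ih]

theorem wagaStatsEq (s : String) : wagaStats s = (wagaW s.toList, wagaV s.toList) := by
  simp only [wagaStats, PySem.Dict.foldl_insert_getD_add_one_eq_counter,
    PySem.Dict.items_counter]
  have hnd := PySem.Set.nodup_ofList (xs := s.toList)
  have hm : ∀ k, k ∈ PySem.Set.ofList s.toList ↔ k ∈ s.toList :=
    fun k => PySem.Set.mem_ofList _ _
  simp only [Prod.mk.injEq]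
  constructor
  · -- weight
    rw [List.map_map]
    exact wagaSumCount _ _ hnd hm (fun c => (c.toNat : Int))
  · -- vowels
    rw [List.filter_map, List.map_map]
    have hfilter : List.filter ((fun p : Char × Int => ("aeiouy".toList).contains p.1)
          ∘ fun k => (k, (s.toList.count k : Int))) (PySem.Set.ofList s.toList)
        = List.filter wagaVowelP (PySem.Set.ofList s.toList) :=
      List.filter_congr (fun k _ => rfl)
    have hmap : ∀ l : List Char, List.map ((fun p : Char × Int => p.2) ∘ fun k => (k, (s.toList.count k : Int))) l
        = List.map (fun k => (s.toList.count k : Int)) l :=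
      fun l => List.map_congr_left (fun k _ => rfl)
    rw [hfilter, hmap]
    rw [wagaFilterMapSum _ wagaVowelP (fun k => (s.toList.count k : Int))]
    have heq : (PySem.Set.ofList s.toList).map
          (fun k => if wagaVowelP k then (s.toList.count k : Int) else 0)
        = (PySem.Set.ofList s.toList).map
          (fun k => (if wagaVowelP k then (1 : Int) else 0) * (s.toList.count k : Int)) := by
      apply List.map_congr_left
      intro k _
      by_cases h : wagaVowelP k <;> simp [h]
    rw [heq]
    exact wagaSumCount _ _ hnd hm (fun k => if wagaVowelP k then (1 : Int) else 0)

-- ===== VERDICT (by name: the statement is the Claim_ definition above) =====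
theorem waga_spec : Claim_equal_waga := by
  intro s1 s2 _
  unfold Spec_waga waga waga_alt
  simp only [wagaFoldA, wagaStatsEq, zero_add, Prod.mk.injEq]
  by_cases hW : wagaW s1.toList = wagaW s2.toList <;>
    by_cases hV : wagaV s1.toList = wagaV s2.toList <;>
      simp [hW, hV]
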